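-- pv_equiv track=rewrite | github.com/fortra/impacket | impacket/krb5/ccache.py | reverseFlags
-- ===== SOURCE A (Python) =====
-- def reverseFlags(flags):
--     result = 0
--     if isinstance(flags, str):
--         flags = flags[1:-2]
--     for i,j in enumerate(reversed(flags)):
--         if j != 0:
--             result += j << i
--     return result
-- ===== SOURCE B (Python) =====
-- def reverseFlags(flags):
--     if isinstance(flags, str):
--         flags = flags[1:-2]
--     result = 0
--     for j in flags:
--         result = (result << 1) + j
--     return result
-- ===== Notes on version B (the rewrite author's own statement) =====
-- stated objective: idiomatic
-- what changed: Replaces the reversed+enumerate indexed bit-weighted sum (result += j << i) with a forward Horner left-fold (result = (result << 1) + j), dropping the reverse, the index bookkeeping and the j != 0 guard.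
import Mathlib
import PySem

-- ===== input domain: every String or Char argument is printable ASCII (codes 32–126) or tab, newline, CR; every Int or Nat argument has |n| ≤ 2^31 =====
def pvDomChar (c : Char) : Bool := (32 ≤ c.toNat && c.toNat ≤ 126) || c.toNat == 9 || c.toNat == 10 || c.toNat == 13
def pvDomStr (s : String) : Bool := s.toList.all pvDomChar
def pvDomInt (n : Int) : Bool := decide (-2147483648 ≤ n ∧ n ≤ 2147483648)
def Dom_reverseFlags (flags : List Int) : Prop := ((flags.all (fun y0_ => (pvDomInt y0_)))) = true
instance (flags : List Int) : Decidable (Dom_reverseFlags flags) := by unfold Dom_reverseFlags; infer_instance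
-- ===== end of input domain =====

-- B replaces A's reversed+enumerate shifted sum by a forward Horner fold (idiomatic, same O(n) cost).

-- ===== PORT A =====
-- for i, j in enumerate(reversed(flags)): if j != 0: result += j << i
-- (the isinstance(flags, str) branch cannot fire: flags is a list of ints here)
def reverseFlags (flags : List Int) : Int :=
  (PySem.List.enumerate flags.reverse).foldl
    (fun result ij => if ij.2 ≠ 0 then result + ij.2 * 2 ^ ij.1.toNat else result) 0

-- ===== PORT B =====
-- result = 0; for j in flags: result = (result << 1) + j
def reverseFlags_alt (flags : List Int) : Int :=
  flags.foldl (fun result j => result * 2 + j) 0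

-- ===== PRECONDITION & SPEC =====
def Spec_reverseFlags (flags : List Int) (out : Int) : Prop := out = reverseFlags_alt flags
instance (flags : List Int) (out : Int) : Decidable (Spec_reverseFlags flags out) := by unfold Spec_reverseFlags; infer_instance

-- ===== CLAIM (what is proved, stated in full; the proofs are below) =====
def Claim_equal_reverseFlags : Prop := ∀ (flags : List Int), Dom_reverseFlags flags → Spec_reverseFlags flags (reverseFlags flags)

-- ===== LEMMAS AND PROOFS =====

-- B's Horner fold with an arbitrary accumulator
theorem horner_acc (l : List Int) : ∀ (acc : Int),
    l.foldl (fun result j => result * 2 + j) acc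
      = acc * 2 ^ l.length + l.foldl (fun result j => result * 2 + j) 0 := by
  induction l with
  | nil => intro acc; simp
  | cons x t ih =>
      intro acc
      simp only [List.foldl_cons, List.length_cons]
      rw [ih (acc * 2 + x), ih (0 * 2 + x)]
      ring

theorem ports_eq (l : List Int) : reverseFlags l = reverseFlags_alt l := by
  induction l with
  | nil => rfl
  | cons x t ih =>
      unfold reverseFlags reverseFlags_alt at *
      simp only [List.reverse_cons, PySem.List.enumerate_append, PySem.List.enumerate_cons,
        PySem.List.enumerate_nil, List.foldl_append, List.foldl_cons, List.foldl_nil,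
        List.length_reverse]
      rw [ih, horner_acc t (0 * 2 + x)]
      have hn : ((0 : Int) + (t.length : Int)).toNat = t.length := by omega
      split_ifs with h
      · rw [hn]; ring
      · have hx : x = 0 := by simpa using h
        subst hx; ring

-- ===== VERDICT (by name: the statement is the Claim_ definition above) =====
theorem reverseFlags_spec : Claim_equal_reverseFlags := by
  intro flags _
  unfold Spec_reverseFlags
  exact ports_eq flags
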